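-- pv_equiv track=rewrite | github.com/stasiforest/usb-token | token.py | usb_crc5
-- ===== SOURCE A (Python) =====
-- def usb_crc5(addr: int, endp: int) -> int:
--     data = addr | (endp << 7)
--     crc = 0x1F
--
--     for i in range(11):
--         bit = (data >> i) & 1
--         c = (crc & 1) ^ bit
--         crc >>= 1
--         if c:
--             crc ^= 0x14
--
--     crc ^= 0x1F
--     return crc & 0x1F
-- ===== SOURCE B (Python) =====
-- # CRC5 is linear over GF(2): precompute a 2048-entry table from the per-bit
-- # contributions (taps) once, then each call is a mask + single table lookup.
-- _BASE = 0x02  # CRC5 of the all-zero 11-bit word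
-- _TAPS = (0x1F, 0x17, 0x07, 0x0E, 0x1C, 0x11, 0x0B, 0x16, 0x05, 0x0A, 0x14)
--
--
-- def _crc5_of(v):
--     x = _BASE
--     for i, t in enumerate(_TAPS):
--         if (v >> i) & 1:
--             x ^= t
--     return x
--
--
-- _CRC5 = [_crc5_of(v) for v in range(2048)]
--
--
-- def usb_crc5(addr: int, endp: int) -> int:
--     return _CRC5[(addr | (endp << 7)) & 0x7FF]
-- ===== Notes on version B (the rewrite author's own statement) =====
-- stated objective: idiomatic
-- what changed: Replaces the per-call 11-step shift-register bit loop with a 2048-entry CRC5 table precomputed at module load (built from the per-bit XOR taps, exploiting CRC linearity), so each call is one mask and one indexed lookup.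
import Mathlib
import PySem

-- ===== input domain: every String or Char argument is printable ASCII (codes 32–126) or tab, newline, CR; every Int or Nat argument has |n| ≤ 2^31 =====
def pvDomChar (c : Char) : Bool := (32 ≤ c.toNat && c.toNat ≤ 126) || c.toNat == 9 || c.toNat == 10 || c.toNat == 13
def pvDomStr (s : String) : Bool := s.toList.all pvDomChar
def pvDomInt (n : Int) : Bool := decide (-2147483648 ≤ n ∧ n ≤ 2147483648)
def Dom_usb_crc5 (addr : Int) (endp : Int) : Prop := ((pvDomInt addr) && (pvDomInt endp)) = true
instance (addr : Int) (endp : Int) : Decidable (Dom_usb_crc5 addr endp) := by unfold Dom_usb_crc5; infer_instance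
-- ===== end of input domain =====

-- B replaces A's per-call 11-step CRC bit loop by a module-load 2048-entry table
-- (built from the per-bit XOR taps of the CRC) plus a single mask + lookup per call.

-- ===== PORT A =====
-- loop body of A's `for i in range(11)` (kept as a named helper)
def crc5StepA (data : Int) (crc : Int) (i : Int) : Int :=
  let bit := PySem.Int.band (data >>> i.toNat) 1
  let c := PySem.Int.bxor (PySem.Int.band crc 1) bit
  let crc' := crc >>> (1 : Nat)
  if c ≠ 0 then PySem.Int.bxor crc' 0x14 else crc'

def usb_crc5 (addr : Int) (endp : Int) : Int :=
  let data := PySem.Int.bor addr (endp <<< (7 : Nat))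
  let crc := (PySem.List.pyRange 0 11).foldl (crc5StepA data) 0x1F
  PySem.Int.band (PySem.Int.bxor crc 0x1F) 0x1F

-- ===== PORT B =====
def crc5Taps : List Int := [0x1F, 0x17, 0x07, 0x0E, 0x1C, 0x11, 0x0B, 0x16, 0x05, 0x0A, 0x14]

def crc5Of (v : Int) : Int :=
  (PySem.List.enumerate crc5Taps).foldl
    (fun x p => if PySem.Int.band (v >>> p.1.toNat) 1 ≠ 0 then PySem.Int.bxor x p.2 else x)
    0x02

def crc5Table : List Int := (PySem.List.pyRange 0 2048).map crc5Of

def usb_crc5_alt (addr : Int) (endp : Int) : Int :=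
  PySem.List.pyGetD crc5Table
    (PySem.Int.band (PySem.Int.bor addr (endp <<< (7 : Nat))) 0x7FF) 0

-- ===== PRECONDITION & SPEC =====
def Spec_usb_crc5 (addr : Int) (endp : Int) (out : Int) : Prop := out = usb_crc5_alt addr endp
instance (addr : Int) (endp : Int) (out : Int) : Decidable (Spec_usb_crc5 addr endp out) := by unfold Spec_usb_crc5; infer_instance

-- ===== CLAIM (what is proved, stated in full; the proofs are below) =====
def Claim_equal_usb_crc5 : Prop := ∀ (addr : Int) (endp : Int), Dom_usb_crc5 addr endp → Spec_usb_crc5 addr endp (usb_crc5 addr endp)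

-- ===== LEMMAS AND PROOFS =====

-- A's whole computation as a function of the data word
def crc5A (d : Int) : Int :=
  PySem.Int.band (PySem.Int.bxor ((PySem.List.pyRange 0 11).foldl (crc5StepA d) 0x1F) 0x1F) 0x1F

-- Python's `d & 2047` is `d % 2048` (floor mod), for every int d
lemma band_mask (d : Int) : PySem.Int.band d 2047 = d % 2048 := by
  have hand : ∀ m : Nat, m &&& 2047 = m % 2048 := by
    intro m
    have := Nat.and_two_pow_sub_one_eq_mod m 11
    norm_num at this; omega
  unfold PySem.Int.band
  split_ifs with h1 h2 h3
  · rw [show Int.toNat 2047 = 2047 from rfl, hand]; omega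
  · norm_num at h2
  · rw [show Int.toNat 2047 = 2047 from rfl, Nat.and_comm, hand]; omega
  · norm_num at h3

-- bit i of d equals bit i of d % 2048, for i < 11
lemma bit_eq (d : Int) (i : Nat) (hi : i < 11) :
    PySem.Int.band (d >>> i) 1 = PySem.Int.band ((d % 2048) >>> i) 1 := by
  rw [PySem.Int.band_one, PySem.Int.band_one,
      PySem.Int.mod_eq_emod_of_pos (by norm_num), PySem.Int.mod_eq_emod_of_pos (by norm_num),
      Int.shiftRight_eq_div_pow, Int.shiftRight_eq_div_pow]
  interval_cases i <;> norm_num <;> omega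

-- A's loop only reads bits 0..10 of d
lemma crc5A_mod (d : Int) : crc5A d = crc5A (d % 2048) := by
  unfold crc5A
  rw [PySem.List.foldl_congr_mem (PySem.List.pyRange 0 11) (crc5StepA d) (crc5StepA (d % 2048)) 0x1F ?_]
  intro acc i hi
  rw [PySem.List.mem_pyRange_one] at hi
  unfold crc5StepA
  rw [bit_eq d i.toNat (by omega)]

-- ---- Nat models of the two computations ----

def natStep (n c k : Nat) : Nat :=
  if (c &&& 1) ^^^ ((n >>> k) &&& 1) ≠ 0 then (c >>> 1) ^^^ 20 else c >>> 1

def natA (n : Nat) : Nat :=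
  ((([0,1,2,3,4,5,6,7,8,9,10] : List Nat).foldl (natStep n) 31) ^^^ 31) &&& 31

def natPairs : List (Nat × Nat) :=
  [(0,31),(1,23),(2,7),(3,14),(4,28),(5,17),(6,11),(7,22),(8,5),(9,10),(10,20)]

def natB (n : Nat) : Nat :=
  natPairs.foldl (fun x p => if (n >>> p.1) &&& 1 ≠ 0 then x ^^^ p.2 else x) 2

-- the homogeneous (linear) part of one CRC step, and its iterates
def lin (c : Nat) : Nat := (c >>> 1) ^^^ (c &&& 1) * 20

def linPow : Nat → Nat → Nat
  | 0, c => c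
  | m + 1, c => linPow m (lin c)

def natChainA (n : Nat) : List Nat → Nat
  | [] => 0
  | k :: l => ((n >>> k) &&& 1) * linPow l.length 20 ^^^ natChainA n l

def natChainB (n : Nat) : List (Nat × Nat) → Nat
  | [] => 0
  | p :: ps => ((n >>> p.1) &&& 1) * p.2 ^^^ natChainB n ps

lemma bit_cases (n k : Nat) : (n >>> k) &&& 1 = 0 ∨ (n >>> k) &&& 1 = 1 := by
  rw [Nat.and_one_is_mod]; omega

lemma and1_cases (c : Nat) : c &&& 1 = 0 ∨ c &&& 1 = 1 := by
  rw [Nat.and_one_is_mod]; omega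

-- one A-step is affine: linear part plus the data bit's injection
lemma natStep_eq (n c k : Nat) :
    natStep n c k = lin c ^^^ ((n >>> k) &&& 1) * 20 := by
  unfold natStep lin
  rcases and1_cases c with hc | hc <;> rcases bit_cases n k with hb | hb <;>
    simp [hc, hb]

lemma lin_xor (a b : Nat) : lin (a ^^^ b) = lin a ^^^ lin b := by
  unfold lin
  rw [Nat.shiftRight_xor_distrib, Nat.and_xor_distrib_right]
  have h : ((a &&& 1) ^^^ (b &&& 1)) * 20 = (a &&& 1) * 20 ^^^ (b &&& 1) * 20 := by
    rcases and1_cases a with ha | ha <;> rcases and1_cases b with hb | hb <;> simp [ha, hb]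
  rw [h]
  simp [Nat.xor_assoc, Nat.xor_comm, Nat.xor_left_comm]

lemma linPow_xor (m a b : Nat) : linPow m (a ^^^ b) = linPow m a ^^^ linPow m b := by
  induction m generalizing a b with
  | zero => rfl
  | succ m ih => simp [linPow, lin_xor, ih]

lemma linPow_zero (m : Nat) : linPow m 0 = 0 := by
  induction m with
  | zero => rfl
  | succ m ih => simpa [linPow, lin] using ih

lemma linPow_bit (m b : Nat) (hb : b = 0 ∨ b = 1) :
    linPow m (b * 20) = b * linPow m 20 := by
  rcases hb with h | h <;> simp [h, linPow_zero]

-- the fold is affine in its initial state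
lemma fold_affine (n : Nat) (l : List Nat) :
    ∀ c, l.foldl (natStep n) c = linPow l.length c ^^^ l.foldl (natStep n) 0 := by
  induction l with
  | nil => intro c; simp [linPow]
  | cons k l ih =>
    intro c
    have h0 : natStep n 0 k = ((n >>> k) &&& 1) * 20 := by
      rw [natStep_eq]; simp [lin]
    calc (k :: l).foldl (natStep n) c
        = l.foldl (natStep n) (natStep n c k) := rfl
      _ = linPow l.length (natStep n c k) ^^^ l.foldl (natStep n) 0 := ih _
      _ = linPow l.length (lin c) ^^^ linPow l.length (((n >>> k) &&& 1) * 20)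
            ^^^ l.foldl (natStep n) 0 := by rw [natStep_eq, linPow_xor]
      _ = linPow (k :: l).length c ^^^ (k :: l).foldl (natStep n) 0 := by
            have : (k :: l).foldl (natStep n) 0
                = linPow l.length (((n >>> k) &&& 1) * 20) ^^^ l.foldl (natStep n) 0 := by
              calc (k :: l).foldl (natStep n) 0
                  = l.foldl (natStep n) (natStep n 0 k) := rfl
                _ = linPow l.length (natStep n 0 k) ^^^ l.foldl (natStep n) 0 := ih _
                _ = _ := by rw [h0]
            rw [this]
            simp [List.length_cons, linPow, Nat.xor_assoc]

-- the zero-start fold is the XOR of the per-bit contributions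
lemma fold_chainA (n : Nat) : ∀ l : List Nat, l.foldl (natStep n) 0 = natChainA n l := by
  intro l
  induction l with
  | nil => rfl
  | cons k l ih =>
    have h0 : natStep n 0 k = ((n >>> k) &&& 1) * 20 := by
      rw [natStep_eq]; simp [lin]
    calc (k :: l).foldl (natStep n) 0
        = l.foldl (natStep n) (natStep n 0 k) := rfl
      _ = linPow l.length (natStep n 0 k) ^^^ l.foldl (natStep n) 0 := fold_affine n l _
      _ = ((n >>> k) &&& 1) * linPow l.length 20 ^^^ natChainA n l := by
            rw [h0, ih, linPow_bit _ _ (bit_cases n k)]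
      _ = natChainA n (k :: l) := rfl

lemma fold_chainB (n : Nat) :
    ∀ (ps : List (Nat × Nat)) (x : Nat),
      ps.foldl (fun x p => if (n >>> p.1) &&& 1 ≠ 0 then x ^^^ p.2 else x) x
        = x ^^^ natChainB n ps := by
  intro ps
  induction ps with
  | nil => intro x; simp [natChainB]
  | cons p ps ih =>
    intro x
    have hstep : (if (n >>> p.1) &&& 1 ≠ 0 then x ^^^ p.2 else x)
        = x ^^^ ((n >>> p.1) &&& 1) * p.2 := by
      rcases bit_cases n p.1 with h | h <;> simp [h]
    calc (p :: ps).foldl _ x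
        = ps.foldl _ (if (n >>> p.1) &&& 1 ≠ 0 then x ^^^ p.2 else x) := rfl
      _ = (x ^^^ ((n >>> p.1) &&& 1) * p.2) ^^^ natChainB n ps := by rw [hstep, ih]
      _ = x ^^^ natChainB n (p :: ps) := by simp [natChainB, Nat.xor_assoc]

-- the two contribution chains coincide (the taps are the iterated linear images of 0x14)
lemma chainA_eq_chainB (n : Nat) :
    natChainA n [0,1,2,3,4,5,6,7,8,9,10] = natChainB n natPairs := by
  simp only [natChainA, natChainB, natPairs, List.length_cons, List.length_nil]
  norm_num
  rw [show linPow 10 20 = 31 from by decide, show linPow 9 20 = 23 from by decide,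
      show linPow 8 20 = 7 from by decide, show linPow 7 20 = 14 from by decide,
      show linPow 6 20 = 28 from by decide, show linPow 5 20 = 17 from by decide,
      show linPow 4 20 = 11 from by decide, show linPow 3 20 = 22 from by decide,
      show linPow 2 20 = 5 from by decide, show linPow 1 20 = 10 from by decide,
      show linPow 0 20 = 20 from by decide]

lemma chainB_lt (n : Nat) :
    ∀ ps : List (Nat × Nat), (∀ p ∈ ps, p.2 < 32) → natChainB n ps < 32 := by
  intro ps
  induction ps with
  | nil => intro _; simp [natChainB]
  | cons p ps ih =>
    intro h
    have h1 : ((n >>> p.1) &&& 1) * p.2 < 32 := by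
      rcases bit_cases n p.1 with hb | hb <;> simp [hb]
      exact h p (by simp)
    have h2 : natChainB n ps < 32 := ih fun q hq => h q (by simp [hq])
    calc natChainB n (p :: ps) < 2 ^ 5 :=
          Nat.xor_lt_two_pow (n := 5) h1 h2
      _ = 32 := by norm_num

-- the Nat models agree on every input
lemma natA_eq_natB (n : Nat) : natA n = natB n := by
  have hch : natChainB n natPairs < 32 :=
    chainB_lt n natPairs (by decide)
  have hA : ([0,1,2,3,4,5,6,7,8,9,10] : List Nat).foldl (natStep n) 31
      = 29 ^^^ natChainB n natPairs := by
    rw [fold_affine n _ 31, fold_chainA, chainA_eq_chainB,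
        show (([0,1,2,3,4,5,6,7,8,9,10] : List Nat)).length = 11 from rfl,
        show linPow 11 31 = 29 from by decide]
  unfold natA natB
  rw [hA, fold_chainB]
  have hxor : (29 ^^^ natChainB n natPairs) ^^^ 31 = 2 ^^^ natChainB n natPairs := by
    rw [Nat.xor_comm 29 (natChainB n natPairs), Nat.xor_assoc]
    rw [show (29 : Nat) ^^^ 31 = 2 from by decide, Nat.xor_comm]
  rw [hxor]
  have hlt : 2 ^^^ natChainB n natPairs < 32 := by
    calc 2 ^^^ natChainB n natPairs < 2 ^ 5 :=
          Nat.xor_lt_two_pow (n := 5) (by norm_num) hch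
      _ = 32 := by norm_num
  have hmask := Nat.and_two_pow_sub_one_eq_mod (2 ^^^ natChainB n natPairs) 5
  norm_num at hmask
  rw [hmask, Nat.mod_eq_of_lt hlt]

-- ---- casting the Int ports down to the Nat models ----

lemma cast_shiftRight (n k : Nat) : ((n : Int) >>> k) = ((n >>> k : Nat) : Int) := by
  push_cast; ring

lemma stepA_cast (n c : Nat) (i : Int) :
    crc5StepA (↑n) (↑c) i = ↑(natStep n c i.toNat) := by
  simp only [crc5StepA, natStep]
  rw [cast_shiftRight n i.toNat, cast_shiftRight c 1,
      show (1 : Int) = ((1 : Nat) : Int) from rfl,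
      show (0x14 : Int) = ((20 : Nat) : Int) from rfl,
      PySem.Int.band_natCast, PySem.Int.band_natCast,
      PySem.Int.bxor_natCast, PySem.Int.bxor_natCast,
      apply_ite (fun x : Nat => (x : Int))]
  congr 1
  simp [Int.natCast_eq_zero]

lemma foldA_cast (n : Nat) :
    ∀ (l : List Int) (c : Nat),
      l.foldl (crc5StepA ↑n) ↑c = ↑(List.foldl (natStep n) c (l.map Int.toNat)) := by
  intro l
  induction l with
  | nil => intro c; rfl
  | cons i l ih =>
    intro c
    calc (i :: l).foldl (crc5StepA ↑n) ↑c
        = l.foldl (crc5StepA ↑n) (crc5StepA ↑n ↑c i) := rfl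
      _ = l.foldl (crc5StepA ↑n) ↑(natStep n c i.toNat) := by rw [stepA_cast n c i]
      _ = ↑(List.foldl (natStep n) (natStep n c i.toNat) (l.map Int.toNat)) := ih _
      _ = _ := rfl

lemma crc5A_cast (n : Nat) : crc5A ↑n = ↑(natA n) := by
  unfold crc5A natA
  have hr : PySem.List.pyRange 0 11 = ([0,1,2,3,4,5,6,7,8,9,10] : List Int) := by decide
  rw [hr, show (0x1F : Int) = ((31 : Nat) : Int) from rfl,
      foldA_cast n _ 31]
  rw [show (([0,1,2,3,4,5,6,7,8,9,10] : List Int).map Int.toNat)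
        = ([0,1,2,3,4,5,6,7,8,9,10] : List Nat) from by decide]
  rw [PySem.Int.bxor_natCast, PySem.Int.band_natCast]

lemma stepB_cast (m x : Nat) (p : Nat × Nat) :
    (if PySem.Int.band ((↑m : Int) >>> ((((p.1 : Int)).toNat : Nat) : Int)) 1 ≠ 0
      then PySem.Int.bxor (↑x) (↑p.2) else (↑x : Int))
    = ↑(if (m >>> p.1) &&& 1 ≠ 0 then x ^^^ p.2 else x) := by
  rw [Int.toNat_natCast, Int.shiftRight_natCast,
      show (1 : Int) = ((1 : Nat) : Int) from rfl,
      PySem.Int.band_natCast, PySem.Int.bxor_natCast,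
      apply_ite (fun x : Nat => (x : Int))]
  by_cases hX : (m >>> p.1) &&& 1 = 0
  · rw [if_neg (by simp [hX]), if_neg (by simp [hX])]
  · rw [if_pos (Int.natCast_ne_zero.mpr hX), if_pos hX]

lemma foldB_cast (m : Nat) :
    ∀ (ps : List (Nat × Nat)) (x : Nat),
      (ps.map (fun p => ((p.1 : Int), (p.2 : Int)))).foldl
        (fun x p => if PySem.Int.band ((↑m : Int) >>> p.1.toNat) 1 ≠ 0 then PySem.Int.bxor x p.2 else x)
        ↑x
      = ↑(ps.foldl (fun x p => if (m >>> p.1) &&& 1 ≠ 0 then x ^^^ p.2 else x) x) := by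
  intro ps
  induction ps with
  | nil => intro x; rfl
  | cons p ps ih =>
    intro x
    simp only [List.map_cons, List.foldl_cons]
    rw [stepB_cast m x p]
    exact ih _

lemma crc5Of_cast (m : Nat) : crc5Of ↑m = ↑(natB m) := by
  unfold crc5Of natB
  have he : PySem.List.enumerate crc5Taps
      = natPairs.map (fun p => ((p.1 : Int), (p.2 : Int))) := by decide
  rw [he, show (0x02 : Int) = ((2 : Nat) : Int) from rfl, foldB_cast m natPairs 2]

-- ===== VERDICT (by name: the statement is the Claim_ definition above) =====
theorem usb_crc5_spec : Claim_equal_usb_crc5 := by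
  intro addr endp _
  unfold Spec_usb_crc5 usb_crc5 usb_crc5_alt
  set d := PySem.Int.bor addr (endp <<< (7 : Nat)) with hd
  have h1 : PySem.Int.band (PySem.Int.bxor ((PySem.List.pyRange 0 11).foldl (crc5StepA d) 0x1F) 0x1F) 0x1F = crc5A d := rfl
  have hnn : (0:Int) ≤ d % 2048 := Int.emod_nonneg d (by norm_num)
  have hlt : d % 2048 < 2048 := Int.emod_lt_of_pos d (by norm_num)
  have h2 : PySem.List.pyGetD crc5Table (PySem.Int.band d 0x7FF) 0 = crc5Of (d % 2048) := by
    rw [show (0x7FF:Int) = 2047 from rfl, band_mask]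
    exact PySem.List.pyGetD_map_pyRange_of_nonneg crc5Of 2048 (d % 2048) 0 hnn hlt
  rw [h1, h2, crc5A_mod d]
  rw [show d % 2048 = (((d % 2048).toNat : Nat) : Int) from (Int.toNat_of_nonneg hnn).symm]
  rw [crc5A_cast, crc5Of_cast, natA_eq_natB]
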